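-- pv_equiv track=rewrite | github.com/department-of-veterans-affairs/octo-vista-api-x-mcp-server-example | src/services/validators/cpt_validators.py | categorize_cpt_code
-- ===== SOURCE A (Python) =====
-- def categorize_cpt_code(cpt_code: str, description: str = "") -> str:
--     """
--     Categorize CPT code by procedure type
--
--     Args:
--         cpt_code: The CPT procedure code
--         description: Procedure description
--
--     Returns:
--         Category string: surgery, diagnostic, evaluation, therapy, etc.
--     """
--     if not cpt_code:
--         return "unknown"
--
--     # Check description first for more specific categorization
--     if description:
--         desc_lower = description.lower()
--
--         if any(word in desc_lower for word in ["surgery", "surgical", "operation"]):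
--             return "surgery"
--         elif any(
--             word in desc_lower
--             for word in ["x-ray", "ct", "mri", "ultrasound", "imaging", "radiologic"]
--         ):
--             return "radiology"
--         elif any(
--             word in desc_lower
--             for word in ["lab", "test", "specimen", "biopsy", "pathology"]
--         ):
--             return "pathology"
--         elif any(
--             word in desc_lower for word in ["therapy", "treatment", "rehabilitation"]
--         ):
--             return "therapy"
--         elif any(
--             word in desc_lower
--             for word in ["evaluation", "exam", "consultation", "assessment"]
--         ):
--             return "evaluation"
--
--     # Fall back to standard CPT code ranges
--     try:
--         code_num = int(cpt_code)
--     except (ValueError, TypeError):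
--         return "unknown"
--
--     if 10000 <= code_num <= 69999:
--         return "surgery"
--     elif 70000 <= code_num <= 79999:
--         return "radiology"
--     elif 80000 <= code_num <= 89999:
--         return "pathology"
--     elif 90000 <= code_num <= 99999:
--         return "evaluation"
--     elif 0 <= code_num <= 9999:
--         return "category_i"
--
--     return "other"
-- ===== SOURCE B (Python) =====
-- _CATEGORIES = ["surgery", "radiology", "pathology", "therapy", "evaluation"]
--
-- # Flat keyword list in alphabetical order: (word, priority), priority = index into _CATEGORIES.
-- _KEYWORDS = [
--     ("assessment", 4), ("biopsy", 2), ("consultation", 4), ("ct", 1),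
--     ("evaluation", 4), ("exam", 4), ("imaging", 1), ("lab", 2), ("mri", 1),
--     ("operation", 0), ("pathology", 2), ("radiologic", 1),
--     ("rehabilitation", 3), ("specimen", 2), ("surgery", 0), ("surgical", 0),
--     ("test", 2), ("therapy", 3), ("treatment", 3), ("ultrasound", 1),
--     ("x-ray", 1),
-- ]
--
-- _BUCKETS = ["category_i"] + ["surgery"] * 6 + ["radiology", "pathology", "evaluation"]
--
--
-- def categorize_cpt_code(cpt_code: str, description: str = "") -> str:
--     if not cpt_code:
--         return "unknown"
--
--     if description:
--         d = description.lower()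
--         # single pass over all keywords, keeping the minimal (highest-priority) match
--         best = None
--         for word, prio in _KEYWORDS:
--             if (best is None or prio < best) and word in d:
--                 best = prio
--         if best is not None:
--             return _CATEGORIES[best]
--
--     try:
--         n = int(cpt_code)
--     except (ValueError, TypeError):
--         return "unknown"
--
--     bucket = n // 10000
--     return _BUCKETS[bucket] if 0 <= bucket <= 9 else "other"
-- ===== Notes on version B (the rewrite author's own statement) =====
-- stated objective: alternative
-- what changed: The five staged early-return keyword scans are replaced by one single pass over a flat alphabetical (word, priority) list that keeps the minimal matched priority (order-independent min-accumulator), and the numeric range chain by a floor-division bucket indexed into a list.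
import Mathlib
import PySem

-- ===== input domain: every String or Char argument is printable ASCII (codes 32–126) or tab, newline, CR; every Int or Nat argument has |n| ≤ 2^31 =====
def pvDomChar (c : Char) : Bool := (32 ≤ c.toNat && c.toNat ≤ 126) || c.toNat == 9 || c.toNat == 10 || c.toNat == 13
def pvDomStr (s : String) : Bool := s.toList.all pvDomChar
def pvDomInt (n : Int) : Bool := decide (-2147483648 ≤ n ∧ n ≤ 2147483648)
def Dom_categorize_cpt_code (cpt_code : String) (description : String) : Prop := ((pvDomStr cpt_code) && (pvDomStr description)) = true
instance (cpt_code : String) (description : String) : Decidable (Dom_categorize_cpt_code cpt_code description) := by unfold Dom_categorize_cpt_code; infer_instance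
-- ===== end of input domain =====

-- B replaces A's five staged early-return keyword scans by ONE pass over a flat alphabetical
-- (word, priority) list keeping the minimal matched priority, and A's numeric range chain by a
-- floor-division bucket (n // 10000) indexing a list; objective: alternative (same cost).


-- ===== PORT A =====
def categorize_cpt_code (cpt_code : String) (description : String) : String :=
  if cpt_code = "" then "unknown" else
  let kw : Option String :=
    if description ≠ "" then
      let desc_lower := PySem.Str.lower description
      if ["surgery", "surgical", "operation"].any (fun w => PySem.Str.isIn w desc_lower) then
        some "surgery"
      else if ["x-ray", "ct", "mri", "ultrasound", "imaging", "radiologic"].any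
          (fun w => PySem.Str.isIn w desc_lower) then
        some "radiology"
      else if ["lab", "test", "specimen", "biopsy", "pathology"].any
          (fun w => PySem.Str.isIn w desc_lower) then
        some "pathology"
      else if ["therapy", "treatment", "rehabilitation"].any
          (fun w => PySem.Str.isIn w desc_lower) then
        some "therapy"
      else if ["evaluation", "exam", "consultation", "assessment"].any
          (fun w => PySem.Str.isIn w desc_lower) then
        some "evaluation"
      else none
    else none
  match kw with
  | some c => c
  | none =>
    match PySem.Int.ofStr? cpt_code with
    | none => "unknown"
    | some code_num =>
      if 10000 ≤ code_num ∧ code_num ≤ 69999 then "surgery"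
      else if 70000 ≤ code_num ∧ code_num ≤ 79999 then "radiology"
      else if 80000 ≤ code_num ∧ code_num ≤ 89999 then "pathology"
      else if 90000 ≤ code_num ∧ code_num ≤ 99999 then "evaluation"
      else if 0 ≤ code_num ∧ code_num ≤ 9999 then "category_i"
      else "other"

-- ===== PORT B =====
def pvCategories : List String := ["surgery", "radiology", "pathology", "therapy", "evaluation"]

-- flat keyword list in alphabetical order: (word, priority), priority = index into pvCategories
def pvKeywords : List (String × Nat) :=
  [ ("assessment", 4), ("biopsy", 2), ("consultation", 4), ("ct", 1),
    ("evaluation", 4), ("exam", 4), ("imaging", 1), ("lab", 2), ("mri", 1),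
    ("operation", 0), ("pathology", 2), ("radiologic", 1),
    ("rehabilitation", 3), ("specimen", 2), ("surgery", 0), ("surgical", 0),
    ("test", 2), ("therapy", 3), ("treatment", 3), ("ultrasound", 1),
    ("x-ray", 1) ]

def pvBuckets : List String :=
  ["category_i", "surgery", "surgery", "surgery", "surgery", "surgery", "surgery",
   "radiology", "pathology", "evaluation"]

-- the loop body: `if (best is None or prio < best) and word in d: best = prio`
def pvStep (d : String) (best : Option Nat) (wp : String × Nat) : Option Nat :=
  if (best.elim true (fun b => wp.2 < b)) && PySem.Str.isIn wp.1 d then some wp.2 else best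

def categorize_cpt_code_alt (cpt_code : String) (description : String) : String :=
  if cpt_code = "" then "unknown" else
  match (if description ≠ "" then
           pvKeywords.foldl (pvStep (PySem.Str.lower description)) none
         else none) with
  | some p => (PySem.List.pyGet? pvCategories (p : Int)).getD ""  -- index always in range (p < 5)
  | none =>
    match PySem.Int.ofStr? cpt_code with
    | none => "unknown"
    | some n =>
      if 0 ≤ PySem.Int.floordiv n 10000 ∧ PySem.Int.floordiv n 10000 ≤ 9 then
        (PySem.List.pyGet? pvBuckets (PySem.Int.floordiv n 10000)).getD "other"
      else "other"

-- ===== PRECONDITION & SPEC =====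
def Spec_categorize_cpt_code (cpt_code : String) (description : String) (out : String) : Prop := out = categorize_cpt_code_alt cpt_code description
instance (cpt_code : String) (description : String) (out : String) : Decidable (Spec_categorize_cpt_code cpt_code description out) := by unfold Spec_categorize_cpt_code; infer_instance

-- ===== CLAIM (what is proved, stated in full; the proofs are below) =====
def Claim_equal_categorize_cpt_code : Prop := ∀ (cpt_code : String) (description : String), Dom_categorize_cpt_code cpt_code description → Spec_categorize_cpt_code cpt_code description (categorize_cpt_code cpt_code description)

-- ===== LEMMAS AND PROOFS =====

-- pvStep is right-commutative: the fold's result does not depend on the list order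
lemma pvStep_rightComm (d : String) :
    ∀ (b : Option Nat) (x y : String × Nat),
      pvStep d (pvStep d b x) y = pvStep d (pvStep d b y) x := by
  intro b x y
  by_cases hx : PySem.Chars.isIn x.1.toList d.toList = true <;>
    by_cases hy : PySem.Chars.isIn y.1.toList d.toList = true <;>
    rcases b with _ | n <;>
    simp [pvStep, hx, hy] <;> split_ifs <;> simp_all <;> omega

-- once `some b` is reached, words of priority ≥ b never change the accumulator
lemma pvFold_absorb (d : String) (b : Nat) :
    ∀ (l : List (String × Nat)), (∀ wp ∈ l, b ≤ wp.2) →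
      l.foldl (pvStep d) (some b) = some b := by
  intro l
  induction l with
  | nil => intro _; rfl
  | cons hd tl ih =>
    intro h
    have hb : ¬ hd.2 < b := by have := h hd (by simp); omega
    simp only [List.foldl_cons, pvStep, Option.elim]
    rw [if_neg (by simp [hb])]
    exact ih (fun wp hw => h wp (by simp [hw]))

-- folding from none over one priority-k group gives `some k` iff some word of the group occurs
lemma pvFold_group (d : String) (k : Nat) :
    ∀ (ws : List String),
      (ws.map (fun w => (w, k))).foldl (pvStep d) none =
        (if ws.any (fun w => PySem.Str.isIn w d) then some k else none) := by
  intro ws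
  induction ws with
  | nil => rfl
  | cons hd tl ih =>
    simp only [List.map_cons, List.foldl_cons, List.any_cons]
    by_cases h : PySem.Chars.isIn hd.toList d.toList = true
    · rw [show pvStep d none (hd, k) = some k by simp [pvStep, h]]
      rw [pvFold_absorb d k _ (by simp)]
      simp [h]
    · rw [Bool.not_eq_true] at h
      rw [show pvStep d none (hd, k) = none by simp [pvStep, h]]
      rw [ih]
      simp [h]

-- the alphabetical keyword list is a permutation of the priority-grouped one
lemma pvKeywords_perm :
    pvKeywords.Perm
      ((["surgery", "surgical", "operation"].map (fun w => (w, 0))) ++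
       (["x-ray", "ct", "mri", "ultrasound", "imaging", "radiologic"].map (fun w => (w, 1))) ++
       (["lab", "test", "specimen", "biopsy", "pathology"].map (fun w => (w, 2))) ++
       (["therapy", "treatment", "rehabilitation"].map (fun w => (w, 3))) ++
       (["evaluation", "exam", "consultation", "assessment"].map (fun w => (w, 4)))) := by
  decide

-- B's single-pass minimal-priority fold equals A's first-matching-group chain
lemma pvFold_eq_chain (d : String) :
    pvKeywords.foldl (pvStep d) none =
      (if ["surgery", "surgical", "operation"].any (fun w => PySem.Str.isIn w d) then some 0
       else if ["x-ray", "ct", "mri", "ultrasound", "imaging", "radiologic"].any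
           (fun w => PySem.Str.isIn w d) then some 1
       else if ["lab", "test", "specimen", "biopsy", "pathology"].any
           (fun w => PySem.Str.isIn w d) then some 2
       else if ["therapy", "treatment", "rehabilitation"].any
           (fun w => PySem.Str.isIn w d) then some 3
       else if ["evaluation", "exam", "consultation", "assessment"].any
           (fun w => PySem.Str.isIn w d) then some 4
       else none) := by
  rw [@List.Perm.foldl_eq _ _ (pvStep d) _ _ ⟨pvStep_rightComm d⟩ pvKeywords_perm none]
  simp only [List.foldl_append]
  rw [pvFold_group d 0]
  by_cases h0 : (["surgery", "surgical", "operation"].any (fun w => PySem.Str.isIn w d)) = true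
  · rw [if_pos h0, if_pos h0]
    rw [pvFold_absorb d 0 _ (by decide), pvFold_absorb d 0 _ (by decide),
        pvFold_absorb d 0 _ (by decide), pvFold_absorb d 0 _ (by decide)]
  rw [if_neg h0, if_neg h0, pvFold_group d 1]
  by_cases h1 : (["x-ray", "ct", "mri", "ultrasound", "imaging", "radiologic"].any
      (fun w => PySem.Str.isIn w d)) = true
  · rw [if_pos h1, if_pos h1]
    rw [pvFold_absorb d 1 _ (by decide), pvFold_absorb d 1 _ (by decide),
        pvFold_absorb d 1 _ (by decide)]
  rw [if_neg h1, if_neg h1, pvFold_group d 2]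
  by_cases h2 : (["lab", "test", "specimen", "biopsy", "pathology"].any
      (fun w => PySem.Str.isIn w d)) = true
  · rw [if_pos h2, if_pos h2]
    rw [pvFold_absorb d 2 _ (by decide), pvFold_absorb d 2 _ (by decide)]
  rw [if_neg h2, if_neg h2, pvFold_group d 3]
  by_cases h3 : (["therapy", "treatment", "rehabilitation"].any
      (fun w => PySem.Str.isIn w d)) = true
  · rw [if_pos h3, if_pos h3]
    rw [pvFold_absorb d 3 _ (by decide)]
  rw [if_neg h3, if_neg h3, pvFold_group d 4]

-- A's numeric range chain equals B's bucket lookup, for every integer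
lemma pv_bucket_eq (n : Int) :
    (if 10000 ≤ n ∧ n ≤ 69999 then "surgery"
     else if 70000 ≤ n ∧ n ≤ 79999 then "radiology"
     else if 80000 ≤ n ∧ n ≤ 89999 then "pathology"
     else if 90000 ≤ n ∧ n ≤ 99999 then "evaluation"
     else if 0 ≤ n ∧ n ≤ 9999 then "category_i"
     else "other")
    = (if 0 ≤ PySem.Int.floordiv n 10000 ∧ PySem.Int.floordiv n 10000 ≤ 9 then
         (PySem.List.pyGet? pvBuckets (PySem.Int.floordiv n 10000)).getD "other"
       else "other") := by
  have hq : PySem.Int.floordiv n 10000 * 10000 ≤ n ∧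
      n < (PySem.Int.floordiv n 10000 + 1) * 10000 :=
    (PySem.Int.floordiv_eq_iff_of_pos (by norm_num)).mp rfl
  generalize hqdef : PySem.Int.floordiv n 10000 = q at hq ⊢
  obtain ⟨h1, h2⟩ := hq
  split_ifs with c1 c2 c3 c4 c5 <;> try rfl
  all_goals
    first
    | (exfalso; omega)
    | (obtain ⟨hb1, hb2⟩ := ‹(0:Int) ≤ q ∧ q ≤ 9›
       interval_cases q <;> first | rfl | (exfalso; omega))

-- ===== VERDICT (by name: the statement is the Claim_ definition above) =====
theorem categorize_cpt_code_spec : Claim_equal_categorize_cpt_code := by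
  intro cpt_code description _
  unfold Spec_categorize_cpt_code
  simp only [categorize_cpt_code, categorize_cpt_code_alt]
  by_cases hc : cpt_code = ""
  · simp [hc]
  rw [if_neg hc, if_neg hc]
  by_cases hd : description ≠ ""
  · rw [if_pos hd, if_pos hd, pvFold_eq_chain (PySem.Str.lower description)]
    split_ifs <;>
      first
      | rfl
      | (rcases PySem.Int.ofStr? cpt_code with _ | n
         · rfl
         · exact pv_bucket_eq n)
  · rw [if_neg hd, if_neg hd]
    rcases PySem.Int.ofStr? cpt_code with _ | n
    · rfl
    · exact pv_bucket_eq n
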